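-- pv_equiv track=rewrite | github.com/inhabae/Splendor | nn/webapp.py | _describe_action
-- ===== SOURCE A (Python) =====
-- _TAKE3_TRIPLETS = (
--     (0, 1, 2),
--     (0, 1, 3),
--     (0, 1, 4),
--     (0, 2, 3),
--     (0, 2, 4),
--     (0, 3, 4),
--     (1, 2, 3),
--     (1, 2, 4),
--     (1, 3, 4),
--     (2, 3, 4),
-- )
--
-- _TAKE2_PAIRS = (
--     (0, 1),
--     (0, 2),
--     (0, 3),
--     (0, 4),
--     (1, 2),
--     (1, 3),
--     (1, 4),
--     (2, 3),
--     (2, 4),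
--     (3, 4),
-- )
--
-- _COLOR_NAMES = ("white", "blue", "green", "red", "black")
--
-- def _describe_action(action_idx: int) -> str:
--     if 0 <= action_idx <= 11:
--         return f"BUY face-up tier {action_idx // 4 + 1} slot {action_idx % 4}"
--     if 12 <= action_idx <= 14:
--         return f"BUY reserved slot {action_idx - 12}"
--     if 15 <= action_idx <= 26:
--         rel = action_idx - 15
--         return f"RESERVE face-up tier {rel // 4 + 1} slot {rel % 4}"
--     if 27 <= action_idx <= 29:
--         return f"RESERVE from deck tier {action_idx - 27 + 1}"
--     if 30 <= action_idx <= 39: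
--         tri = _TAKE3_TRIPLETS[action_idx - 30]
--         names = ", ".join(_COLOR_NAMES[i] for i in tri)
--         return f"TAKE 3 gems ({names})"
--     if 40 <= action_idx <= 44:
--         return f"TAKE 2 gems ({_COLOR_NAMES[action_idx - 40]})"
--     if 45 <= action_idx <= 54:
--         pair = _TAKE2_PAIRS[action_idx - 45]
--         names = ", ".join(_COLOR_NAMES[i] for i in pair)
--         return f"TAKE 2 gems ({names})"
--     if 55 <= action_idx <= 59:
--         return f"TAKE 1 gem ({_COLOR_NAMES[action_idx - 55]})"
--     if action_idx == 60:
--         return "PASS"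
--     if 61 <= action_idx <= 65:
--         return f"RETURN gem ({_COLOR_NAMES[action_idx - 61]})"
--     if 66 <= action_idx <= 68:
--         return f"CHOOSE noble index {action_idx - 66}"
--     return f"UNKNOWN action {action_idx}"
-- ===== SOURCE B (Python) =====
-- _COLOR_NAMES = ("white", "blue", "green", "red", "black")
--
-- def _build_table():
--     t = []
--     for tier in range(1, 4):
--         for slot in range(4):
--             t.append(f"BUY face-up tier {tier} slot {slot}")
--     for slot in range(3):
--         t.append(f"BUY reserved slot {slot}")
--     for tier in range(1, 4):
--         for slot in range(4):
--             t.append(f"RESERVE face-up tier {tier} slot {slot}")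
--     for tier in range(1, 4):
--         t.append(f"RESERVE from deck tier {tier}")
--     for a in range(5):
--         for b in range(a + 1, 5):
--             for c in range(b + 1, 5):
--                 t.append(f"TAKE 3 gems ({_COLOR_NAMES[a]}, {_COLOR_NAMES[b]}, {_COLOR_NAMES[c]})")
--     for a in range(5):
--         t.append(f"TAKE 2 gems ({_COLOR_NAMES[a]})")
--     for a in range(5):
--         for b in range(a + 1, 5):
--             t.append(f"TAKE 2 gems ({_COLOR_NAMES[a]}, {_COLOR_NAMES[b]})")
--     for a in range(5):
--         t.append(f"TAKE 1 gem ({_COLOR_NAMES[a]})")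
--     t.append("PASS")
--     for a in range(5):
--         t.append(f"RETURN gem ({_COLOR_NAMES[a]})")
--     for i in range(3):
--         t.append(f"CHOOSE noble index {i}")
--     return tuple(t)
--
-- _ACTION_TABLE = _build_table()
--
-- def _describe_action(action_idx: int) -> str:
--     if 0 <= action_idx < len(_ACTION_TABLE):
--         return _ACTION_TABLE[action_idx]
--     return f"UNKNOWN action {action_idx}"
-- ===== Notes on version B (the rewrite author's own statement) =====
-- stated objective: idiomatic
-- what changed: Replaced A's ten-branch if/elif chain of per-branch arithmetic and joins by a table of every action description built once at module load from nested range loops, so the function itself is a single bounds check plus table lookup.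
import Mathlib
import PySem

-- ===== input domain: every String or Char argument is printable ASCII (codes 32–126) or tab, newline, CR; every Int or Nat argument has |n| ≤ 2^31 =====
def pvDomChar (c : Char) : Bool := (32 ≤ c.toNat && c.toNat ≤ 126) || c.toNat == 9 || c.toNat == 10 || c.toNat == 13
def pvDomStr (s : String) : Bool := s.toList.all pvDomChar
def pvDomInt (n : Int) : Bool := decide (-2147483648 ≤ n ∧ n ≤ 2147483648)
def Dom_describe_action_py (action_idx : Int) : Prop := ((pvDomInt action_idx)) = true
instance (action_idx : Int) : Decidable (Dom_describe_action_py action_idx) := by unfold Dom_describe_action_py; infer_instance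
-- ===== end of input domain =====

-- B replaces A's ten-branch if/elif chain by a table of all 69 descriptions built once at
-- module load, so the function body is a single bounds check and table lookup (objective: idiomatic).

-- ===== PORT A =====
def pvTake3Triplets : List (Int × Int × Int) :=
  [(0, 1, 2), (0, 1, 3), (0, 1, 4), (0, 2, 3), (0, 2, 4),
   (0, 3, 4), (1, 2, 3), (1, 2, 4), (1, 3, 4), (2, 3, 4)]

def pvTake2Pairs : List (Int × Int) :=
  [(0, 1), (0, 2), (0, 3), (0, 4), (1, 2),
   (1, 3), (1, 4), (2, 3), (2, 4), (3, 4)]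

def pvColorNames : List String := ["white", "blue", "green", "red", "black"]

-- _COLOR_NAMES[i]; every index A uses comes from the literal tuples above, so always in range
def pvColor (i : Int) : String := (PySem.List.pyGet? pvColorNames i).getD ""

def describe_action_py (action_idx : Int) : String :=
  if 0 ≤ action_idx ∧ action_idx ≤ 11 then
    "BUY face-up tier " ++ PySem.Int.toStr (PySem.Int.floordiv action_idx 4 + 1) ++
      " slot " ++ PySem.Int.toStr (PySem.Int.mod action_idx 4)
  else if 12 ≤ action_idx ∧ action_idx ≤ 14 then
    "BUY reserved slot " ++ PySem.Int.toStr (action_idx - 12)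
  else if 15 ≤ action_idx ∧ action_idx ≤ 26 then
    let rel := action_idx - 15
    "RESERVE face-up tier " ++ PySem.Int.toStr (PySem.Int.floordiv rel 4 + 1) ++
      " slot " ++ PySem.Int.toStr (PySem.Int.mod rel 4)
  else if 27 ≤ action_idx ∧ action_idx ≤ 29 then
    "RESERVE from deck tier " ++ PySem.Int.toStr (action_idx - 27 + 1)
  else if 30 ≤ action_idx ∧ action_idx ≤ 39 then
    let tri := (PySem.List.pyGet? pvTake3Triplets (action_idx - 30)).getD (0, 0, 0)
    let names := PySem.Str.join ", " [pvColor tri.1, pvColor tri.2.1, pvColor tri.2.2]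
    "TAKE 3 gems (" ++ names ++ ")"
  else if 40 ≤ action_idx ∧ action_idx ≤ 44 then
    "TAKE 2 gems (" ++ pvColor (action_idx - 40) ++ ")"
  else if 45 ≤ action_idx ∧ action_idx ≤ 54 then
    let pair := (PySem.List.pyGet? pvTake2Pairs (action_idx - 45)).getD (0, 0)
    let names := PySem.Str.join ", " [pvColor pair.1, pvColor pair.2]
    "TAKE 2 gems (" ++ names ++ ")"
  else if 55 ≤ action_idx ∧ action_idx ≤ 59 then
    "TAKE 1 gem (" ++ pvColor (action_idx - 55) ++ ")"
  else if action_idx = 60 then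
    "PASS"
  else if 61 ≤ action_idx ∧ action_idx ≤ 65 then
    "RETURN gem (" ++ pvColor (action_idx - 61) ++ ")"
  else if 66 ≤ action_idx ∧ action_idx ≤ 68 then
    "CHOOSE noble index " ++ PySem.Int.toStr (action_idx - 66)
  else
    "UNKNOWN action " ++ PySem.Int.toStr action_idx

-- ===== PORT B =====
-- _build_table(): the nested for-loops of Source B, each loop a foldl over its range, appending
def pvActionTable : List String :=
  let t : List String := []
  let t := (PySem.List.pyRange 1 4 1).foldl (fun t tier =>
    (PySem.List.pyRange 0 4 1).foldl (fun t slot =>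
      t ++ ["BUY face-up tier " ++ PySem.Int.toStr tier ++ " slot " ++ PySem.Int.toStr slot]) t) t
  let t := (PySem.List.pyRange 0 3 1).foldl (fun t slot =>
    t ++ ["BUY reserved slot " ++ PySem.Int.toStr slot]) t
  let t := (PySem.List.pyRange 1 4 1).foldl (fun t tier =>
    (PySem.List.pyRange 0 4 1).foldl (fun t slot =>
      t ++ ["RESERVE face-up tier " ++ PySem.Int.toStr tier ++ " slot " ++ PySem.Int.toStr slot]) t) t
  let t := (PySem.List.pyRange 1 4 1).foldl (fun t tier =>
    t ++ ["RESERVE from deck tier " ++ PySem.Int.toStr tier]) t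
  let t := (PySem.List.pyRange 0 5 1).foldl (fun t a =>
    (PySem.List.pyRange (a + 1) 5 1).foldl (fun t b =>
      (PySem.List.pyRange (b + 1) 5 1).foldl (fun t c =>
        t ++ ["TAKE 3 gems (" ++ pvColor a ++ ", " ++ pvColor b ++ ", " ++ pvColor c ++ ")"]) t) t) t
  let t := (PySem.List.pyRange 0 5 1).foldl (fun t a =>
    t ++ ["TAKE 2 gems (" ++ pvColor a ++ ")"]) t
  let t := (PySem.List.pyRange 0 5 1).foldl (fun t a =>
    (PySem.List.pyRange (a + 1) 5 1).foldl (fun t b =>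
      t ++ ["TAKE 2 gems (" ++ pvColor a ++ ", " ++ pvColor b ++ ")"]) t) t
  let t := (PySem.List.pyRange 0 5 1).foldl (fun t a =>
    t ++ ["TAKE 1 gem (" ++ pvColor a ++ ")"]) t
  let t := t ++ ["PASS"]
  let t := (PySem.List.pyRange 0 5 1).foldl (fun t a =>
    t ++ ["RETURN gem (" ++ pvColor a ++ ")"]) t
  let t := (PySem.List.pyRange 0 3 1).foldl (fun t i =>
    t ++ ["CHOOSE noble index " ++ PySem.Int.toStr i]) t
  t

def describe_action_py_alt (action_idx : Int) : String :=
  if 0 ≤ action_idx ∧ action_idx < (pvActionTable.length : Int) then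
    (PySem.List.pyGet? pvActionTable action_idx).getD ""
  else
    "UNKNOWN action " ++ PySem.Int.toStr action_idx

-- ===== PRECONDITION & SPEC =====
def Spec_describe_action_py (action_idx : Int) (out : String) : Prop := out = describe_action_py_alt action_idx
instance (action_idx : Int) (out : String) : Decidable (Spec_describe_action_py action_idx out) := by unfold Spec_describe_action_py; infer_instance

-- ===== CLAIM (what is proved, stated in full; the proofs are below) =====
def Claim_equal_describe_action_py : Prop := ∀ (action_idx : Int), Dom_describe_action_py action_idx → Spec_describe_action_py action_idx (describe_action_py action_idx)

-- ===== LEMMAS AND PROOFS =====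
theorem pvActionTable_length : (pvActionTable.length : Int) = 69 := by decide

-- ===== VERDICT (by name: the statement is the Claim_ definition above) =====
theorem describe_action_py_spec : Claim_equal_describe_action_py := by
  intro i _
  unfold Spec_describe_action_py
  by_cases h : 0 ≤ i ∧ i ≤ 68
  · obtain ⟨h1, h2⟩ := h
    interval_cases i <;> decide
  · unfold describe_action_py describe_action_py_alt
    rw [pvActionTable_length]
    rw [if_neg (by omega), if_neg (by omega), if_neg (by omega), if_neg (by omega),
        if_neg (by omega), if_neg (by omega), if_neg (by omega), if_neg (by omega),
        if_neg (by omega), if_neg (by omega), if_neg (by omega), if_neg (by omega)]
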